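-- pv_equiv track=rewrite | github.com/Kolanser/algorithms | introduction_to_algorithms/sleight_of_hand.py | get_max_ball
-- ===== SOURCE A (Python) =====
-- def get_max_ball(number_of_clicks: int, matrix: str) -> int:
--     count_symbols = {}
--     symbol_counter = 1
--     start_counter = 0
--     for symbol in matrix:
--         if symbol != '.':
--             if not count_symbols.get(symbol):
--                 count_symbols[symbol] = start_counter
--             count_symbols[symbol] += symbol_counter
--     max_ball = 0
--     numbers_players = 2
--     for count_symbol in count_symbols.values():
--         if count_symbol <= number_of_clicks * numbers_players:
--             max_ball = max_ball + 1
--     return max_ball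
-- ===== SOURCE B (Python) =====
-- def get_max_ball(number_of_clicks: int, matrix: str) -> int:
--     chars = sorted(matrix)
--     limit = number_of_clicks * 2
--     max_ball = 0
--     i = 0
--     n = len(chars)
--     while i < n:
--         j = i + 1
--         while j < n and chars[j] == chars[i]:
--             j += 1
--         if chars[i] != '.' and j - i <= limit:
--             max_ball += 1
--         i = j
--     return max_ball
-- ===== Notes on version B (the rewrite author's own statement) =====
-- stated objective: alternative
-- what changed: Replaces the dict-based frequency counting (build a hash map of counts, then scan its values) by sorting the characters and doing a single run-length walk over the sorted sequence, counting runs of non-dot symbols whose length is within 2*clicks.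
import Mathlib
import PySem

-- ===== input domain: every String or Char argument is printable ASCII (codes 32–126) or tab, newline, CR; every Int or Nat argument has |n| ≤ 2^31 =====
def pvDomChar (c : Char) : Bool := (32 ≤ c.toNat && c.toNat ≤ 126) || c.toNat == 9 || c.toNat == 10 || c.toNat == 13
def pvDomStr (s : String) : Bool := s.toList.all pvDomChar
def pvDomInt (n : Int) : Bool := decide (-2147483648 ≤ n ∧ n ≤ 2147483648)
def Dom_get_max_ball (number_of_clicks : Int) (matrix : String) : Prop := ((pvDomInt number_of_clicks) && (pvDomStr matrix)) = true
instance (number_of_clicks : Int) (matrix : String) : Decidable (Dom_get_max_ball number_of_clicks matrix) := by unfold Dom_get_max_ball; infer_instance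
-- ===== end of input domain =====

-- B replaces A's dict of per-symbol counts by sorting the characters and run-length
-- walking the sorted sequence (an alternative algorithm of similar cost).

-- ===== PORT A =====
def get_max_ball (number_of_clicks : Int) (matrix : String) : Int :=
  -- count_symbols = {}; for symbol in matrix: …
  let count_symbols : PySem.Dict Char Int := matrix.toList.foldl
    (fun d symbol =>
      if symbol ≠ '.' then
        -- if not count_symbols.get(symbol): count_symbols[symbol] = 0  (None and 0 are falsy)
        let d1 := if ((d.get? symbol).getD 0) == 0 then d.insert symbol (0 : Int) else d
        -- count_symbols[symbol] += 1
        d1.insert symbol (d1.getD symbol 0 + 1)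
      else d)
    PySem.Dict.empty
  -- for count_symbol in count_symbols.values(): …
  count_symbols.values.foldl
    (fun max_ball count_symbol =>
      if count_symbol ≤ number_of_clicks * 2 then max_ball + 1 else max_ball) 0

-- ===== PORT B =====
-- the run-length walk of Source B: the inner 'while chars[j] == chars[i]' scan is the
-- takeWhile/dropWhile split of the remainder at the current run's symbol
def pvRuns (limit : Int) : List Char → Int
  | [] => 0
  | c :: rest =>
    let run := rest.takeWhile (fun x => x == c)
    let rest' := rest.dropWhile (fun x => x == c)
    (if c ≠ '.' ∧ ((run.length : Int) + 1) ≤ limit then 1 else 0) + pvRuns limit rest'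
termination_by l => l.length
decreasing_by
  exact Nat.lt_succ_of_le (List.length_dropWhile_le _ _)

def get_max_ball_alt (number_of_clicks : Int) (matrix : String) : Int :=
  pvRuns (number_of_clicks * 2) (PySem.List.sorted matrix.toList (fun x => x) false)

-- ===== PRECONDITION & SPEC =====
def Spec_get_max_ball (number_of_clicks : Int) (matrix : String) (out : Int) : Prop := out = get_max_ball_alt number_of_clicks matrix
instance (number_of_clicks : Int) (matrix : String) (out : Int) : Decidable (Spec_get_max_ball number_of_clicks matrix out) := by unfold Spec_get_max_ball; infer_instance

-- ===== CLAIM (what is proved, stated in full; the proofs are below) =====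
def Claim_equal_get_max_ball : Prop := ∀ (number_of_clicks : Int) (matrix : String), Dom_get_max_ball number_of_clicks matrix → Spec_get_max_ball number_of_clicks matrix (get_max_ball number_of_clicks matrix)

-- ===== LEMMAS AND PROOFS =====

-- the common yardstick: the distinct non-dot symbols whose multiplicity is within the limit
def pvPred (limit : Int) (full : List Char) (c : Char) : Bool :=
  (!(c == '.')) && decide ((full.count c : Int) ≤ limit)

-- two nodup lists with the same members count any predicate alike
theorem pv_countP_nodup_ext {l₁ l₂ : List Char} (p : Char → Bool)
    (h₁ : l₁.Nodup) (h₂ : l₂.Nodup) (hm : ∀ x, x ∈ l₁ ↔ x ∈ l₂) :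
    l₁.countP p = l₂.countP p :=
  ((List.perm_ext_iff_of_nodup h₁ h₂).mpr hm).countP_eq p

-- ---- A-side ----

theorem pv_A_body :
    (fun (d : PySem.Dict Char Int) symbol =>
      if symbol ≠ '.' then
        let d1 := if ((d.get? symbol).getD 0) == 0 then d.insert symbol (0 : Int) else d
        d1.insert symbol (d1.getD symbol 0 + 1)
      else d)
    = (fun d c => if (!(c == '.')) = true then d.insert c (d.getD c 0 + 1) else d) := by
  funext d c
  by_cases hc : c = '.'
  · simp [hc]
  · have hb : (c == '.') = false := by simp [hc]
    simp only [ne_eq, hc, not_false_eq_true, if_true, hb, Bool.not_false]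
    rw [← PySem.Dict.getD_eq_get?_getD d c 0]
    by_cases h0 : d.getD c 0 = 0
    · simp only [h0, beq_self_eq_true, if_true, PySem.Dict.getD_insert_self,
        PySem.Dict.insert_insert_self]
    · simp [h0]

theorem pv_A_eq (k : Int) (m : String) :
    get_max_ball k m
      = ((PySem.List.dedup m.toList).countP (pvPred (k * 2) m.toList) : Int) := by
  unfold get_max_ball
  rw [pv_A_body, ← List.foldl_filter (p := fun c => !(c == '.')),
    PySem.Dict.foldl_insert_getD_add_one_eq_counter,
    PySem.List.foldl_ite_add_one (fun v => v ≤ k * 2)]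
  simp only [PySem.Dict.values, PySem.Dict.items_counter, List.map_map, List.countP_map,
    zero_add, Int.natCast_inj]
  rw [← PySem.List.dedup_eq_ofList]
  -- move the count over the filtered list to a count over the whole list, on the
  -- deduplicated filtered list itself
  have h1 : (PySem.List.dedup (m.toList.filter (fun c => !(c == '.')))).countP
        ((fun v => decide (v ≤ k * 2)) ∘ (Prod.snd ∘ fun c => (c, ((m.toList.filter (fun c => !(c == '.'))).count c : Int))))
      = (PySem.List.dedup (m.toList.filter (fun c => !(c == '.')))).countP
        (pvPred (k * 2) m.toList) := by
    apply List.countP_congr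
    intro x hx
    have hxm : x ∈ m.toList.filter (fun c => !(c == '.')) :=
      (PySem.List.mem_dedup _ _).mp hx
    have hxne : (fun c => !(c == '.')) x = true := (List.mem_filter.mp hxm).2
    have hcf : (m.toList.filter (fun c => !(c == '.'))).count x = m.toList.count x :=
      List.count_filter (p := fun c => !(c == '.')) hxne
    simp [pvPred, hxne, hcf]
  rw [h1]
  -- now swap the dedup of the filtered list for the filter of the dedup, then drop the filter
  rw [pv_countP_nodup_ext (pvPred (k * 2) m.toList)
    (PySem.List.nodup_dedup _)
    ((PySem.List.nodup_dedup m.toList).filter (fun c => !(c == '.')))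
    (by
      intro x
      simp [List.mem_filter])]
  rw [List.countP_filter]
  apply List.countP_congr
  intro x _
  by_cases hx : x = '.' <;> simp [pvPred, hx]

-- ---- B-side ----

theorem pv_runs_sorted (lim : Int) :
    ∀ (l : List Char), l.Pairwise (· ≤ ·) →
      pvRuns lim l = ((PySem.List.dedup l).countP (pvPred lim l) : Int) := by
  have main : ∀ (n : Nat) (l : List Char), l.length ≤ n → l.Pairwise (· ≤ ·) →
      pvRuns lim l = ((PySem.List.dedup l).countP (pvPred lim l) : Int) := by
    intro n
    induction n with
    | zero =>
      intro l hl _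
      have hnil : l = [] := List.eq_nil_of_length_eq_zero (Nat.le_zero.mp hl)
      subst hnil; simp [pvRuns]
    | succ n ih =>
      intro l hl hsort
      cases l with
      | nil => simp [pvRuns]
      | cons c rest =>
      have hle : ∀ x ∈ rest, c ≤ x := fun x hx => (List.pairwise_cons.mp hsort).1 x hx
      have hsrest : rest.Pairwise (· ≤ ·) := (List.pairwise_cons.mp hsort).2
      set run := rest.takeWhile (fun x => x == c) with hrun
      set rest' := rest.dropWhile (fun x => x == c) with hrest'
      have hsplit : run ++ rest' = rest := List.takeWhile_append_dropWhile
      have hrunc : ∀ x ∈ run, x = c := fun x hx => by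
        simpa using List.mem_takeWhile_imp hx
      have hsrest' : rest'.Pairwise (· ≤ ·) :=
        List.Pairwise.sublist (List.dropWhile_sublist _) hsrest
      -- everything left after the run is strictly above c
      have hgt : ∀ x ∈ rest', c < x := by
        cases hr : rest' with
        | nil => intro x hx; simp at hx
        | cons b t =>
          intro x hx
          have hhd : (b == c) = false := by
            have h2 := List.head?_dropWhile_not (fun x => x == c) rest
            rw [← hrest', hr] at h2
            simpa using h2
          have hhc : c < b := by
            have hmem : b ∈ rest := (List.dropWhile_sublist _).subset
              (by rw [← hrest', hr]; exact List.mem_cons_self)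
            have hbc : b ≠ c := by simpa using hhd
            exact lt_of_le_of_ne (hle b hmem) hbc.symm
          rcases List.mem_cons.mp hx with rfl | hxt
          · exact hhc
          · have h3 := hsrest'
            rw [hr] at h3
            exact lt_of_lt_of_le hhc ((List.pairwise_cons.mp h3).1 x hxt)
      have hcnot : c ∉ rest' := fun hc => lt_irrefl c (hgt c hc)
      have hIH := ih rest' (le_trans (List.length_dropWhile_le _ _)
        (by simpa using Nat.lt_succ_iff.mp (Nat.lt_of_lt_of_le (Nat.lt_succ_of_le (le_refl _)) hl))) hsrest'
      -- count of c in the whole list is the run length + 1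
      have hcount : (c :: rest).count c = run.length + 1 := by
        rw [← hsplit, List.count_cons_self, List.count_append,
          List.count_eq_zero.mpr hcnot, List.count_eq_length.mpr (fun x hx => by
            simp [hrunc x hx])]
      -- dedup (c :: rest) counts like c :: dedup rest'
      have hded : (PySem.List.dedup (c :: rest)).countP (pvPred lim (c :: rest))
          = (c :: PySem.List.dedup rest').countP (pvPred lim (c :: rest)) := by
        apply pv_countP_nodup_ext _ (PySem.List.nodup_dedup _)
        · exact List.nodup_cons.mpr ⟨fun h => hcnot ((PySem.List.mem_dedup _ _).mp h),
            PySem.List.nodup_dedup _⟩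
        · intro x
          rw [PySem.List.mem_dedup]
          constructor
          · intro hx
            rcases List.mem_cons.mp hx with rfl | hx
            · exact List.mem_cons_self
            · rw [← hsplit] at hx
              rcases List.mem_append.mp hx with hx | hx
              · simp [hrunc x hx]
              · exact List.mem_cons_of_mem _ ((PySem.List.mem_dedup _ _).mpr hx)
          · intro hx
            rcases List.mem_cons.mp hx with rfl | hx
            · exact List.mem_cons_self
            · have : x ∈ rest' := (PySem.List.mem_dedup _ _).mp hx
              exact List.mem_cons_of_mem _ (by rw [← hsplit]; exact List.mem_append_right _ this)
      -- on dedup rest', counting in the whole list is counting in rest'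
      have hcong : (PySem.List.dedup rest').countP (pvPred lim (c :: rest))
          = (PySem.List.dedup rest').countP (pvPred lim rest') := by
        apply List.countP_congr
        intro x hx
        have hxr : x ∈ rest' := (PySem.List.mem_dedup _ _).mp hx
        have hxc : x ≠ c := fun h => hcnot (h ▸ hxr)
        have : (c :: rest).count x = rest'.count x := by
          rw [← hsplit, List.count_cons, List.count_append,
            List.count_eq_zero.mpr (fun hm => hxc (hrunc x hm))]
          simp [Ne.symm hxc]
        simp [pvPred, this]
      have hstep : pvRuns lim (c :: rest)
          = (if c ≠ '.' ∧ ((run.length : Int) + 1) ≤ lim then 1 else 0) + pvRuns lim rest' := by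
        rw [pvRuns]
      rw [hstep, hded, List.countP_cons, hcong, hIH]
      have hpredc : pvPred lim (c :: rest) c = decide (c ≠ '.' ∧ ((run.length : Int) + 1) ≤ lim) := by
        simp only [pvPred, hcount]
        by_cases hc : c = '.' <;> simp [hc]
      rw [hpredc]
      by_cases hif : c ≠ '.' ∧ ((run.length : Int) + 1) ≤ lim <;>
        simp [hif] <;> omega
  exact fun l => main l.length l (le_refl _)

theorem pv_B_eq (k : Int) (m : String) :
    get_max_ball_alt k m
      = ((PySem.List.dedup m.toList).countP (pvPred (k * 2) m.toList) : Int) := by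
  unfold get_max_ball_alt
  have hperm : (PySem.List.sorted m.toList (fun x => x) false).Perm m.toList :=
    PySem.List.sorted_perm _ _ _
  rw [pv_runs_sorted (k * 2) _ (PySem.List.sorted_pairwise m.toList (fun x => x))]
  congr 1
  -- switch counts from the sorted list to the original, then dedups likewise
  have h1 : (PySem.List.dedup (PySem.List.sorted m.toList (fun x => x) false)).countP
        (pvPred (k * 2) (PySem.List.sorted m.toList (fun x => x) false))
      = (PySem.List.dedup (PySem.List.sorted m.toList (fun x => x) false)).countP
        (pvPred (k * 2) m.toList) := by
    apply List.countP_congr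
    intro x _
    simp [pvPred, hperm.count_eq x]
  rw [h1]
  exact pv_countP_nodup_ext _ (PySem.List.nodup_dedup _) (PySem.List.nodup_dedup _)
    (by intro x; rw [PySem.List.mem_dedup, PySem.List.mem_dedup]; exact hperm.mem_iff)

-- ===== VERDICT (by name: the statement is the Claim_ definition above) =====
theorem get_max_ball_spec : Claim_equal_get_max_ball := by
  intro k m _
  unfold Spec_get_max_ball
  rw [pv_A_eq, pv_B_eq]
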